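-- pv_equiv track=rewrite | github.com/Jiaweihu08/EPI | 16 - Dynamic Programming/16.12 - longest_nondecreasing_subsequence.py | longest_nondecreasing_subsequence_nlogn
-- ===== SOURCE A (Python) =====
-- import bisect
--
-- def longest_nondecreasing_subsequence_nlogn(A):
-- 	nondecreaseing_subsequence = []
-- 	for num in A:
-- 		position = bisect.bisect_right(nondecreaseing_subsequence, num)
-- 		if position == len(nondecreaseing_subsequence):
-- 			nondecreaseing_subsequence.append(num)
-- 		else:
-- 			nondecreaseing_subsequence[position] = num
-- 	return len(nondecreaseing_subsequence)
-- ===== SOURCE B (Python) =====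
-- def longest_nondecreasing_subsequence_nlogn(A):
-- 	# Classic quadratic DP: dp holds (value, length of the longest
-- 	# nondecreasing subsequence ending at that value's position).
-- 	dp = []
-- 	for x in A:
-- 		best = 1
-- 		for v, d in dp:
-- 			if v <= x and d + 1 > best:
-- 				best = d + 1
-- 		dp.append((x, best))
-- 	return max((d for _, d in dp), default=0)
-- ===== Notes on version B (the rewrite author's own statement) =====
-- stated objective: alternative
-- what changed: Replaces the greedy tails array maintained with bisect_right by the classic quadratic dynamic program over (value, best-length-ending-here) pairs, returning the maximum dp value.
import Mathlib
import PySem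

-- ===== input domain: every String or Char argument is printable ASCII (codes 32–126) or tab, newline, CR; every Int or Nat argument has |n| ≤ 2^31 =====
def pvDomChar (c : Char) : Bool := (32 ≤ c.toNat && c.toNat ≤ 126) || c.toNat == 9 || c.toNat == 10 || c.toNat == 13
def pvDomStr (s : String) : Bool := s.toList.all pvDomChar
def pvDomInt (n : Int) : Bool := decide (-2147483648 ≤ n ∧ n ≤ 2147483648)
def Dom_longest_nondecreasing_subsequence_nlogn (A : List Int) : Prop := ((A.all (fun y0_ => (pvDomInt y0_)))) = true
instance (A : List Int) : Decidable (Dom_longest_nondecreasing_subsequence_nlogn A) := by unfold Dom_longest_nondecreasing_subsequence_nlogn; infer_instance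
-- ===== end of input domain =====

-- B replaces A's greedy tails/bisect pass by the classic quadratic DP over
-- (value, best-length-ending-here) pairs; alternative algorithm, not faster.

-- ===== PORT A =====
-- bisect.bisect_right ported as the length of the leading run of elements ≤ x:
-- exact on sorted lists, and the tails list A maintains is always sorted.
def pyBisectRight (l : List Int) (x : Int) : Nat :=
  (l.takeWhile (fun e => decide (e ≤ x))).length

def lnsLoop : List Int → List Int → List Int
  | t, [] => t
  | t, num :: rest =>
    let position := pyBisectRight t num
    lnsLoop (if position = t.length then t ++ [num] else t.set position num) rest

def longest_nondecreasing_subsequence_nlogn (A : List Int) : Int :=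
  ((lnsLoop [] A).length : Int)

-- ===== PORT B =====
def lnsDp : List (Int × Int) → List Int → List (Int × Int)
  | dp, [] => dp
  | dp, x :: rest =>
    let best := dp.foldl (fun b p => if p.1 ≤ x ∧ p.2 + 1 > b then p.2 + 1 else b) 1
    lnsDp (dp ++ [(x, best)]) rest

def longest_nondecreasing_subsequence_nlogn_alt (A : List Int) : Int :=
  (lnsDp [] A).foldl (fun m p => if p.2 > m then p.2 else m) 0

-- ===== PRECONDITION & SPEC =====
def Spec_longest_nondecreasing_subsequence_nlogn (A : List Int) (out : Int) : Prop := out = longest_nondecreasing_subsequence_nlogn_alt A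
instance (A : List Int) (out : Int) : Decidable (Spec_longest_nondecreasing_subsequence_nlogn A out) := by unfold Spec_longest_nondecreasing_subsequence_nlogn; infer_instance

-- ===== CLAIM (what is proved, stated in full; the proofs are below) =====
def Claim_equal_longest_nondecreasing_subsequence_nlogn : Prop := ∀ (A : List Int), Dom_longest_nondecreasing_subsequence_nlogn A → Spec_longest_nondecreasing_subsequence_nlogn A (longest_nondecreasing_subsequence_nlogn A)

-- ===== LEMMAS AND PROOFS =====

-- number of elements ≤ y in the tails list
def cnt (t : List Int) (y : Int) : Nat := t.countP (fun e => decide (e ≤ y))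

-- best dp value among pairs whose value is ≤ x (0 if none)
def Lf (acc : List (Int × Int)) (x : Int) : Int :=
  acc.foldl (fun m p => if p.1 ≤ x then max m p.2 else m) 0

-- best dp value overall (0 if none)
def Mf (acc : List (Int × Int)) : Int :=
  acc.foldl (fun m p => max m p.2) 0

-- The coupling invariant between A's tails list and B's dp pairs.
def LnsInv (t : List Int) (acc : List (Int × Int)) : Prop :=
  t.Pairwise (· ≤ ·) ∧ (∀ y, (cnt t y : Int) = Lf acc y) ∧ ((t.length : Int) = Mf acc)

lemma best_eq (x : Int) : ∀ (dp : List (Int × Int)) (b : Int),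
    dp.foldl (fun b p => if p.1 ≤ x ∧ p.2 + 1 > b then p.2 + 1 else b) b
      = dp.foldl (fun m p => if p.1 ≤ x then max m p.2 else m) (b - 1) + 1
  | [], b => by simp only [List.foldl_nil]; omega
  | p :: dp, b => by
    simp only [List.foldl_cons]
    rw [best_eq x dp]
    have : (if p.1 ≤ x ∧ p.2 + 1 > b then p.2 + 1 else b) - 1
        = (if p.1 ≤ x then max (b - 1) p.2 else b - 1) := by
      split_ifs <;> omega
    rw [this]

lemma Mf_if : ∀ (dp : List (Int × Int)) (m : Int),
    dp.foldl (fun m p => if p.2 > m then p.2 else m) m = dp.foldl (fun m p => max m p.2) m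
  | [], m => rfl
  | p :: dp, m => by
    simp only [List.foldl_cons]
    rw [Mf_if dp]
    congr 1
    split_ifs <;> omega

lemma tw_count : ∀ (t : List Int) (x : Int), t.Pairwise (· ≤ ·) →
    pyBisectRight t x = cnt t x
  | [], _, _ => rfl
  | a :: t, x, h => by
    rcases List.pairwise_cons.mp h with ⟨ha, ht⟩
    by_cases hax : a ≤ x
    · simpa [pyBisectRight, cnt, List.countP_cons, hax] using tw_count t x ht
    · have h0 : t.countP (fun e => decide (e ≤ x)) = 0 := by
        refine List.countP_eq_zero.mpr (fun e he => ?_)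
        simp only [decide_eq_true_eq]
        exact fun hle => hax (le_trans (ha e he) hle)
      simp [pyBisectRight, cnt, hax, h0]

lemma dropWhile_head_false {p : Int → Bool} : ∀ (l : List Int) (a : Int) (l2 : List Int),
    l.dropWhile p = a :: l2 → p a = false
  | [], a, l2, h => by simp at h
  | b :: l, a, l2, h => by
    by_cases hb : p b
    · exact dropWhile_head_false l a l2 (by simpa [List.dropWhile_cons, hb] using h)
    · simp [hb] at h
      rw [← h.1]; simpa using hb

lemma set_at_append : ∀ (t1 : List Int) (a : Int) (t2 : List Int) (x : Int),
    (t1 ++ a :: t2).set t1.length x = t1 ++ x :: t2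
  | [], a, t2, x => rfl
  | b :: t1, a, t2, x => by
    simp only [List.cons_append, List.length_cons, List.set_cons_succ]
    rw [set_at_append t1 a t2 x]

lemma cnt_split (t1 : List Int) (c : Int) (t2 : List Int) (y : Int) :
    cnt (t1 ++ c :: t2) y = cnt t1 y + (if c ≤ y then 1 else 0) + cnt t2 y := by
  simp [cnt, List.countP_append, List.countP_cons]
  split_ifs <;> omega

lemma cnt_all (t : List Int) (y : Int) (h : ∀ e ∈ t, e ≤ y) : cnt t y = t.length := by
  refine List.countP_eq_length.mpr (fun e he => ?_)
  simpa using h e he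

lemma cnt_none (t : List Int) (y : Int) (h : ∀ e ∈ t, ¬ e ≤ y) : cnt t y = 0 := by
  refine List.countP_eq_zero.mpr (fun e he => ?_)
  simpa using h e he

lemma step_replace (t1 : List Int) (old : Int) (t2 : List Int) (acc : List (Int × Int)) (x : Int)
    (hs : (t1 ++ old :: t2).Pairwise (· ≤ ·))
    (hc : ∀ y, (cnt (t1 ++ old :: t2) y : Int) = Lf acc y)
    (hl : (((t1 ++ old :: t2).length : Nat) : Int) = Mf acc)
    (h1 : ∀ e ∈ t1, e ≤ x) (hold : ¬ old ≤ x) :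
    LnsInv (t1 ++ x :: t2) (acc ++ [(x, Lf acc x + 1)]) := by
  rcases List.pairwise_append.mp hs with ⟨p1, pc, hcross⟩
  rcases List.pairwise_cons.mp pc with ⟨hot2, p2⟩
  have hxlt : x < old := lt_of_not_ge hold
  have hLf' : ∀ y, Lf (acc ++ [(x, Lf acc x + 1)]) y
      = if x ≤ y then max (Lf acc y) (Lf acc x + 1) else Lf acc y := by
    intro y; simp [Lf, List.foldl_append]
  have hMf' : Mf (acc ++ [(x, Lf acc x + 1)]) = max (Mf acc) (Lf acc x + 1) := by
    simp [Mf, List.foldl_append]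
  have ht2x : ∀ e ∈ t2, ¬ e ≤ x := fun e he hle =>
    hold (le_trans (hot2 e he) hle)
  have hLx : Lf acc x = (t1.length : Int) := by
    rw [← hc x, cnt_split, cnt_all t1 x h1, cnt_none t2 x ht2x]
    simp [hold]
  refine ⟨?_, ?_, ?_⟩
  · refine List.pairwise_append.mpr ⟨p1, List.pairwise_cons.mpr ⟨?_, p2⟩, ?_⟩
    · exact fun e he => le_trans (le_of_lt hxlt) (hot2 e he)
    · intro a ha b hb
      rcases List.mem_cons.mp hb with rfl | hb2
      · exact h1 a ha
      · exact hcross a ha b (List.mem_cons_of_mem _ hb2)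
  · intro y
    rw [hLf' y, cnt_split]
    by_cases hxy : x ≤ y
    · have hc1 : cnt t1 y = t1.length := cnt_all t1 y (fun e he => le_trans (h1 e he) hxy)
      have hyv : Lf acc y = (cnt t1 y : Int) + (if old ≤ y then 1 else 0) + (cnt t2 y : Int) := by
        rw [← hc y, cnt_split]; push_cast; split_ifs <;> omega
      by_cases hoy : old ≤ y
      · rw [hyv, hc1, hLx]
        simp [hxy, hoy]
      · have hc2 : cnt t2 y = 0 := cnt_none t2 y (fun e he hle =>
          hoy (le_trans (hot2 e he) hle))
        rw [hyv, hc1, hc2, hLx]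
        simp [hxy, hoy]
    · have hoy : ¬ old ≤ y := fun hle => hxy (le_trans (le_of_lt hxlt) hle)
      rw [← hc y, cnt_split]
      simp [hxy, hoy]
  · rw [hMf', ← hl, hLx]
    simp only [List.length_append, List.length_cons]
    push_cast
    omega

lemma step_inv (t : List Int) (acc : List (Int × Int)) (x : Int) (h : LnsInv t acc) :
    LnsInv (if pyBisectRight t x = t.length then t ++ [x] else t.set (pyBisectRight t x) x)
        (acc ++ [(x, Lf acc x + 1)]) := by
  obtain ⟨hs, hc, hl⟩ := h
  by_cases hcase : pyBisectRight t x = t.length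
  · -- append case: every element of t is ≤ x
    have hall : ∀ e ∈ t, e ≤ x := by
      have := List.countP_eq_length.mp (by rw [← tw_count t x hs, hcase] : cnt t x = t.length)
      intro e he; simpa using this e he
    have hLx : Lf acc x = (t.length : Int) := by rw [← hc x, cnt_all t x hall]
    rw [if_pos hcase]
    refine ⟨?_, ?_, ?_⟩
    · refine List.pairwise_append.mpr ⟨hs, List.pairwise_singleton _ _, ?_⟩
      intro a ha b hb
      rcases List.mem_singleton.mp hb with rfl
      exact hall a ha
    · intro y
      have hLf' : Lf (acc ++ [(x, Lf acc x + 1)]) y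
          = if x ≤ y then max (Lf acc y) (Lf acc x + 1) else Lf acc y := by
        simp [Lf, List.foldl_append]
      rw [hLf']
      have hsplit : cnt (t ++ [x]) y = cnt t y + (if x ≤ y then 1 else 0) := by
        simp [cnt, List.countP_append, List.countP_cons]
      rw [hsplit]
      by_cases hxy : x ≤ y
      · have hcy : cnt t y = t.length := cnt_all t y (fun e he => le_trans (hall e he) hxy)
        rw [← hc y] at *
        rw [hcy, hLx] at *
        simp [hxy]
      · rw [← hc y]
        simp [hxy]
    · have hMf' : Mf (acc ++ [(x, Lf acc x + 1)]) = max (Mf acc) (Lf acc x + 1) := by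
        simp [Mf, List.foldl_append]
      rw [hMf', ← hl, hLx]
      simp only [List.length_append, List.length_singleton]
      push_cast
      omega
  · -- replace case: decompose t at the insertion point
    rw [if_neg hcase]
    have hTD := (List.takeWhile_append_dropWhile (p := fun e => decide (e ≤ x)) (l := t)).symm
    rcases hrest : t.dropWhile (fun e => decide (e ≤ x)) with _ | ⟨old, t2⟩
    · exfalso
      have h2 : t.takeWhile (fun e => decide (e ≤ x)) = t := by
        have h3 := List.takeWhile_append_dropWhile (p := fun e => decide (e ≤ x)) (l := t)
        rw [hrest, List.append_nil] at h3
        exact h3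
      exact hcase (by simp [pyBisectRight, h2])
    · set t1 := t.takeWhile (fun e => decide (e ≤ x)) with ht1
      have ht : t = t1 ++ old :: t2 := by rw [hTD, hrest]
      have hpos : pyBisectRight t x = t1.length := rfl
      have h1 : ∀ e ∈ t1, e ≤ x := by
        intro e he
        have := List.mem_takeWhile_imp (ht1 ▸ he)
        simpa using this
      have hold : ¬ old ≤ x := by
        have := dropWhile_head_false t old t2 hrest
        simpa using this
      rw [hpos, ht, set_at_append]
      exact step_replace t1 old t2 acc x (ht ▸ hs) (fun y => ht ▸ hc y) (ht ▸ hl) h1 hold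

lemma loop_inv : ∀ (L : List Int) (t : List Int) (acc : List (Int × Int)),
    LnsInv t acc → LnsInv (lnsLoop t L) (lnsDp acc L)
  | [], t, acc, h => h
  | x :: rest, t, acc, h => by
    have hb : acc.foldl (fun b p => if p.1 ≤ x ∧ p.2 + 1 > b then p.2 + 1 else b) 1
        = Lf acc x + 1 := by
      rw [best_eq]; norm_num [Lf]
    have e1 : lnsLoop t (x :: rest)
        = lnsLoop (if pyBisectRight t x = t.length then t ++ [x]
            else t.set (pyBisectRight t x) x) rest := rfl
    have e2 : lnsDp acc (x :: rest)
        = lnsDp (acc ++ [(x, acc.foldl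
            (fun b p => if p.1 ≤ x ∧ p.2 + 1 > b then p.2 + 1 else b) 1)]) rest := rfl
    rw [e1, e2, hb]
    exact loop_inv rest _ _ (step_inv t acc x h)

-- ===== VERDICT (by name: the statement is the Claim_ definition above) =====
theorem longest_nondecreasing_subsequence_nlogn_spec : Claim_equal_longest_nondecreasing_subsequence_nlogn := by
  intro A _
  unfold Spec_longest_nondecreasing_subsequence_nlogn
  obtain ⟨-, -, hl⟩ := loop_inv A [] []
    ⟨List.Pairwise.nil, fun y => by simp [cnt, Lf], by simp [Mf]⟩
  unfold longest_nondecreasing_subsequence_nlogn longest_nondecreasing_subsequence_nlogn_alt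
  rw [hl, Mf_if]
  rfl
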